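-- pv_equiv track=rewrite | github.com/Gyanano/qimen_backend | app/qimen.py | fly_items
-- ===== SOURCE A (Python) =====
-- from typing import Dict, Any, List, Tuple
--
-- PALACE_NUMBERS = [1, 2, 3, 4, 5, 6, 7, 8, 9]
--
-- def fly_items(board_type: str, ju: int, items: List[str]) -> Dict[int, str]:
--     """Fly a sequence of items around the nine palaces.
--
--     On Yang boards the sequence moves forward; on Yin boards it moves backward.
--     The starting palace corresponds to the ju number.
--     """
--     mapping: Dict[int, str] = {}
--     n = len(PALACE_NUMBERS)
--     start_idx = ju - 1
--     for i, item in enumerate(items):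
--         if board_type == "yang":
--             pos_idx = (start_idx + i) % n
--         else:
--             pos_idx = (start_idx - i) % n
--         palace = PALACE_NUMBERS[pos_idx]
--         mapping[palace] = item
--     return mapping
-- ===== SOURCE B (Python) =====
-- PALACE_NUMBERS = [1, 2, 3, 4, 5, 6, 7, 8, 9]
--
-- def fly_items(board_type, ju, items):
--     """Slice out the flight-order palace sequence once, then pair it with items."""
--     k = (ju - 1) % 9
--     if board_type == "yang":
--         seq = PALACE_NUMBERS[k:] + PALACE_NUMBERS[:k]
--     else:
--         seq = PALACE_NUMBERS[k::-1] + PALACE_NUMBERS[:k:-1]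
--     reps = (len(items) + 8) // 9
--     return dict(zip(seq * reps, items))
-- ===== Notes on version B (the rewrite author's own statement) =====
-- stated objective: idiomatic
-- what changed: B replaces the per-item modular index arithmetic and palace lookup inside the loop by materializing the flight-order palace sequence once via slicing (forward rotation for yang, reversed rotation for yin), repeating it to cover the item count, and building the dict in one dict(zip(...)).
import Mathlib
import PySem

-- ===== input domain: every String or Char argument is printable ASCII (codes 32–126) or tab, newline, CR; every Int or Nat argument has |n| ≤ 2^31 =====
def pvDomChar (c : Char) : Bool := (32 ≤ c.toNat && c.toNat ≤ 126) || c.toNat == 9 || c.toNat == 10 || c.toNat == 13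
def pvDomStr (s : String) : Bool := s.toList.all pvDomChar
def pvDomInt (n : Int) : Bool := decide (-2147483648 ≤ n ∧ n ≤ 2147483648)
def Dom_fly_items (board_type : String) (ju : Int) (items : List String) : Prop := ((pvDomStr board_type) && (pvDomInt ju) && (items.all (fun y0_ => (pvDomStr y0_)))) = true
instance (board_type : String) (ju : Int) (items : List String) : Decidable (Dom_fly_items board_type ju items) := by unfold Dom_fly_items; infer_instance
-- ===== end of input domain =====

-- B builds the flight-order palace sequence once by slicing and pairs it with the
-- items in a single zip, instead of per-item modular index arithmetic (objective: idiomatic).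

-- ===== PORT A =====
def pvPalaceNumbers : List Int := [1, 2, 3, 4, 5, 6, 7, 8, 9]

-- literal port of A's enumerate loop; PALACE_NUMBERS[pos_idx] never raises since
-- pos_idx = _ % 9 ∈ [0, 9), so the totalising `.getD 0` default is never used
def fly_items (board_type : String) (ju : Int) (items : List String) : List (Int × String) :=
  let n : Int := (pvPalaceNumbers.length : Int)
  let start_idx := ju - 1
  let mapping :=
    (PySem.List.enumerate items).foldl
      (fun mapping p =>
        let pos_idx := if board_type == "yang" then PySem.Int.mod (start_idx + p.1) n
                       else PySem.Int.mod (start_idx - p.1) n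
        let palace := (PySem.List.pyGet? pvPalaceNumbers pos_idx).getD 0
        mapping.insert palace p.2)
      (PySem.Dict.empty : PySem.Dict Int String)
  mapping.items

-- ===== PORT B =====
-- literal port of Source B; the `.getD []` on slice? is never used (step is the literal -1)
def fly_items_alt (board_type : String) (ju : Int) (items : List String) : List (Int × String) :=
  let k := PySem.Int.mod (ju - 1) 9
  let seq :=
    if board_type == "yang" then
      PySem.List.slice pvPalaceNumbers (some k) none ++ PySem.List.slice pvPalaceNumbers none (some k)
    else
      (PySem.List.slice? pvPalaceNumbers (some k) none (-1)).getD []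
        ++ (PySem.List.slice? pvPalaceNumbers none (some k) (-1)).getD []
  let reps := PySem.Int.floordiv ((items.length : Int) + 8) 9
  let d :=
    ((List.replicate reps.toNat seq).flatten.zip items).foldl
      (fun d p => d.insert p.1 p.2) (PySem.Dict.empty : PySem.Dict Int String)
  d.items

-- ===== PRECONDITION & SPEC =====
def Spec_fly_items (board_type : String) (ju : Int) (items : List String) (out : List (Int × String)) : Prop := out = fly_items_alt board_type ju items
instance (board_type : String) (ju : Int) (items : List String) (out : List (Int × String)) : Decidable (Spec_fly_items board_type ju items out) := by unfold Spec_fly_items; infer_instance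

-- ===== CLAIM (what is proved, stated in full; the proofs are below) =====
def Claim_equal_fly_items : Prop := ∀ (board_type : String) (ju : Int) (items : List String), Dom_fly_items board_type ju items → Spec_fly_items board_type ju items (fly_items board_type ju items)

-- ===== LEMMAS AND PROOFS =====

-- the two folds insert the same key/value sequence
theorem pv_fold_zip {g : Int → Int} : ∀ (items : List String) (ks : List Int) (s : Int)
    (d : PySem.Dict Int String),
    (∀ j : Nat, j < items.length → ks[j]? = some (g (s + j))) →
    (PySem.List.enumerate items s).foldl (fun d p => d.insert (g p.1) p.2) d
      = (ks.zip items).foldl (fun d p => d.insert p.1 p.2) d := by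
  intro items
  induction items with
  | nil => intro ks s d _; simp [PySem.List.enumerate_nil]
  | cons it rest ih =>
    intro ks s d h
    have h0 := h 0 (by simp)
    cases ks with
    | nil => simp at h0
    | cons k ks' =>
      simp at h0
      rw [PySem.List.enumerate_cons]
      simp only [List.zip_cons_cons, List.foldl_cons, h0]
      exact ih ks' (s + 1) _ (fun j hj => by
        have := h (j + 1) (by simpa using Nat.succ_lt_succ hj)
        simpa [add_assoc, add_comm, add_left_comm] using this)

theorem pv_flatten_replicate {α : Type} (seq : List α) (h9 : seq.length = 9) :
    ∀ (m : Nat) (j : Nat), j < 9 * m →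
      (List.replicate m seq).flatten[j]? = seq[j % 9]? := by
  intro m
  induction m with
  | zero => intro j hj; omega
  | succ m ih =>
    intro j hj
    rw [List.replicate_succ, List.flatten_cons]
    by_cases hlt : j < 9
    · rw [List.getElem?_append_left (by omega), Nat.mod_eq_of_lt hlt]
    · rw [List.getElem?_append_right (by omega), h9]
      have : (j - 9) % 9 = j % 9 := by omega
      rw [← this]; exact ih (j - 9) (by omega)

theorem pv_get_palace (p : Int) (h0 : 0 ≤ p) (h9 : p < 9) :
    (PySem.List.pyGet? pvPalaceNumbers p).getD 0 = p + 1 := by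
  interval_cases p <;> rfl

theorem pv_seq_yang (k : Int) (h0 : 0 ≤ k) (h9 : k < 9) (r : Nat) (hr : r < 9) :
    (PySem.List.slice pvPalaceNumbers (some k) none
      ++ PySem.List.slice pvPalaceNumbers none (some k))[r]?
      = some ((k + r) % 9 + 1) := by
  interval_cases k <;> interval_cases r <;> rfl

theorem pv_seq_yin (k : Int) (h0 : 0 ≤ k) (h9 : k < 9) (r : Nat) (hr : r < 9) :
    ((PySem.List.slice? pvPalaceNumbers (some k) none (-1)).getD []
      ++ (PySem.List.slice? pvPalaceNumbers none (some k) (-1)).getD [])[r]?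
      = some ((k - r) % 9 + 1) := by
  interval_cases k <;> interval_cases r <;> rfl

theorem pv_len_yang (k : Int) (h0 : 0 ≤ k) (h9 : k < 9) :
    (PySem.List.slice pvPalaceNumbers (some k) none
      ++ PySem.List.slice pvPalaceNumbers none (some k)).length = 9 := by
  interval_cases k <;> rfl

theorem pv_len_yin (k : Int) (h0 : 0 ≤ k) (h9 : k < 9) :
    ((PySem.List.slice? pvPalaceNumbers (some k) none (-1)).getD []
      ++ (PySem.List.slice? pvPalaceNumbers none (some k) (-1)).getD []).length = 9 := by
  interval_cases k <;> rfl

-- ===== VERDICT (by name: the statement is the Claim_ definition above) =====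
theorem fly_items_spec : Claim_equal_fly_items := by
  intro board_type ju items _
  unfold Spec_fly_items fly_items fly_items_alt
  simp only []
  set k := PySem.Int.mod (ju - 1) 9 with hk
  have hkemod : k = (ju - 1) % 9 := PySem.Int.mod_eq_emod_of_pos (by norm_num)
  have hk0 : 0 ≤ k := by rw [hkemod]; omega
  have hk9 : k < 9 := by rw [hkemod]; omega
  have hmod : ∀ a : Int, PySem.Int.mod a 9 = a % 9 :=
    fun a => PySem.Int.mod_eq_emod_of_pos (by norm_num)
  set reps := PySem.Int.floordiv ((items.length : Int) + 8) 9 with hreps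
  have hreps' : reps = ((items.length : Int) + 8) / 9 :=
    PySem.Int.floordiv_eq_ediv_of_pos (by norm_num)
  have hlen : items.length ≤ 9 * reps.toNat := by
    have h1 : 9 * (((items.length : Int) + 8) / 9) ≥ (items.length : Int) := by omega
    omega
  congr 1
  by_cases hb : board_type == "yang"
  · simp only [hb, if_true]
    refine pv_fold_zip (g := fun i =>
      ((PySem.List.pyGet? pvPalaceNumbers
        (PySem.Int.mod (ju - 1 + i) (pvPalaceNumbers.length : Int))).getD 0))
      items _ 0 _ (fun j hj => ?_)
    rw [pv_flatten_replicate _ (pv_len_yang k hk0 hk9) reps.toNat j (by omega)]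
    rw [pv_seq_yang k hk0 hk9 (j % 9) (by omega)]
    have hlen9 : ((pvPalaceNumbers.length : Nat) : Int) = 9 := rfl
    simp only [hlen9]
    rw [pv_get_palace _ (PySem.Int.mod_nonneg _ (by norm_num)) (PySem.Int.mod_lt _ (by norm_num))]
    refine congrArg some ?_
    rw [hmod, hkemod]
    push_cast
    omega
  · simp only [hb, Bool.false_eq_true, if_false]
    refine pv_fold_zip (g := fun i =>
      ((PySem.List.pyGet? pvPalaceNumbers
        (PySem.Int.mod (ju - 1 - i) (pvPalaceNumbers.length : Int))).getD 0))
      items _ 0 _ (fun j hj => ?_)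
    rw [pv_flatten_replicate _ (pv_len_yin k hk0 hk9) reps.toNat j (by omega)]
    rw [pv_seq_yin k hk0 hk9 (j % 9) (by omega)]
    have hlen9 : ((pvPalaceNumbers.length : Nat) : Int) = 9 := rfl
    simp only [hlen9]
    rw [pv_get_palace _ (PySem.Int.mod_nonneg _ (by norm_num)) (PySem.Int.mod_lt _ (by norm_num))]
    refine congrArg some ?_
    rw [hmod, hkemod]
    push_cast
    omega
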